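-- pv_equiv track=rewrite | github.com/wyuinche/Problem_Solving | book316_kakao.py | solution
-- ===== SOURCE A (Python) =====
-- from collections import Counter
--
-- def solution(food_times, k):
--     answer = 0
--
--     counter = Counter(food_times)
--     counter_time = sorted(counter.keys())
--
--     if sum(food_times) <= k:
--         return -1
--
--     before = 0
--     left = len(food_times)
--     turn = 0
--     for t in counter_time:
--         if left <= 0:
--             return -1
--         before = k
--         k -= (t - turn) * left
--         if k < 0:
--             k = before
--             while True:
--                 if k - left <= 0:
--                     for i in range(len(food_times)):
--                         if food_times[i] > turn:
--                             if k <= 0: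
--                                 return i+1
--                             k -= 1
--                     turn += 1
--                 else:
--                     k -= left
--                     turn += 1
--                     if turn in counter_time:
--                         left -= counter[turn]
--
--         turn = t
--         left -= counter[t]
--     return answer
-- ===== SOURCE B (Python) =====
-- def solution(food_times, k):
--     # Sort (time, index) pairs once; skip whole blocks of full rounds per
--     # distinct time level, then resolve the final partial round with a modulo.
--     if sum(food_times) <= k:
--         return -1
--     pairs = sorted(((t, i) for i, t in enumerate(food_times)), key=lambda p: p[0])
--     n = len(pairs)
--     prev = 0
--     for j, (t, _) in enumerate(pairs):
--         rem = n - j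
--         block = (t - prev) * rem
--         if k < block:
--             rest = sorted(i for _, i in pairs[j:])
--             return rest[k % rem] + 1
--         k -= block
--         prev = t
--     return -1
-- ===== Notes on version B (the rewrite author's own statement) =====
-- stated objective: alternative
-- what changed: Replaces A's Counter-driven loop, whose overshoot resolution advances the time level one second-block at a time and then rescans the whole list, by one sort of (time,index) pairs, whole-block subtraction per distinct time level, and a single modulo into the sorted surviving indices for the final round; intended as asymptotically faster (O(n log n) vs O(n log n + max_time)), but timing runs were inconsistent (one read 4.8x, another inconclusive), so no speed is claimed.
-- outside the precondition, e.g. on solution([1, 2], -1): A returns 1, B returns 2; on solution([-2, -1], -5): A does not finish within the time limit, B returns 2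
import Mathlib
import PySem

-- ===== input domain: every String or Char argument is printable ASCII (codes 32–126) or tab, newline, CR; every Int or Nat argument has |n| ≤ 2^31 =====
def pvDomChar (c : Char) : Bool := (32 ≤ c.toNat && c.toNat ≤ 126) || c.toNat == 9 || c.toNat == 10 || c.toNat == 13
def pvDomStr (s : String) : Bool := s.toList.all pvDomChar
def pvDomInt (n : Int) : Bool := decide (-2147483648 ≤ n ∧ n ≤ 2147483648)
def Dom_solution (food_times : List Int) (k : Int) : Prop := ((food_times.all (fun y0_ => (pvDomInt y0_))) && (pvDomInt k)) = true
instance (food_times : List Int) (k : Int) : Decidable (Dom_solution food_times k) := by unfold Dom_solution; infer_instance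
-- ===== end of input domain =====

-- B replaces A's per-second-block overshoot loop by sort + block subtraction + modulo;
-- equivalence of the RETURN value is proved on Pre_ (the problem's natural domain).

-- ===== PORT A =====
-- the inner `for i in range(len(food_times)): if food_times[i] > turn: …` scan,
-- over enumerate(food_times); returns (early return value?, k after the scan)
def pvScanA : List (Int × Int) → Int → Int → Option Int × Int
  | [], _, k => (none, k)
  | (i, ft) :: rest, turn, k =>
    if turn < ft then
      if k ≤ 0 then (some (i + 1), k)
      else pvScanA rest turn (k - 1)
    else pvScanA rest turn k

-- the `while True:` loop; it only exits via the scan's `return i+1`, so the port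
-- returns Option Int with fuel (`none` = still looping; under Pre_ the fuel suffices)
def pvWhileA (en : List (Int × Int)) (counter : PySem.Dict Int Int) (ct : List Int) :
    Nat → Int → Int → Int → Option Int
  | 0, _, _, _ => none
  | fuel + 1, k, left, turn =>
    if k - left ≤ 0 then
      match pvScanA en turn k with
      | (some r, _) => some r
      | (none, k') => pvWhileA en counter ct fuel k' left (turn + 1)
    else
      let k' := k - left
      let turn' := turn + 1
      let left' := if turn' ∈ ct then left - counter.getD turn' 0 else left
      pvWhileA en counter ct fuel k' left' turn'

-- the `for t in counter_time:` loop (state k, left, turn; early returns)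
def pvOuterA (en : List (Int × Int)) (counter : PySem.Dict Int Int) (ct : List Int) :
    List Int → Int → Int → Int → Int
  | [], _, _, _ => 0            -- `return answer` (answer = 0)
  | t :: rest, k, left, turn =>
    if left ≤ 0 then -1
    else
      let before := k
      let k1 := k - (t - turn) * left
      if k1 < 0 then (pvWhileA en counter ct (before.toNat + 2) before left turn).getD 0
      else pvOuterA en counter ct rest k1 (left - counter.getD t 0) t

def solution (food_times : List Int) (k : Int) : Int :=
  let counter := PySem.Dict.counter food_times
  let counter_time := PySem.List.sorted counter.keys (fun x => x)
  if food_times.sum ≤ k then -1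
  else pvOuterA (PySem.List.enumerate food_times 0) counter counter_time counter_time
        k (food_times.length : Int) 0

-- ===== PORT B =====
-- the `for j, (t, _) in enumerate(pairs):` loop of Source B over the remaining suffix
-- (rem = n - j = length of the suffix); `rest[k % rem]` is always in range
-- (0 ≤ k % rem < rem = len(rest)), so pyGetD is exact
def pvGoB : List (Int × Int) → Int → Int → Int
  | [], _, _ => -1
  | (t, i) :: rest, prev, k =>
    let rem : Int := (rest.length : Int) + 1
    let block := (t - prev) * rem
    if k < block then
      PySem.List.pyGetD (PySem.List.sorted (((t, i) :: rest).map Prod.snd) (fun x => x))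
        (PySem.Int.mod k rem) 0 + 1
    else pvGoB rest t (k - block)

def solution_alt (food_times : List Int) (k : Int) : Int :=
  if food_times.sum ≤ k then -1
  else pvGoB (PySem.List.sorted ((PySem.List.enumerate food_times 0).map (fun p => (p.2, p.1))) Prod.fst)
        0 k

-- ===== PRECONDITION & SPEC =====
-- Pre_ is the problem's natural domain (nonnegative eating times, nonnegative k),
-- plus every input with sum(food_times) <= k (where A answers -1 immediately).
-- It excludes negative times / negative k with sum > k, where A's second-stepping
-- over negative durations diverges or returns accidental values.
def Pre_solution (food_times : List Int) (k : Int) : Prop :=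
  food_times.sum ≤ k ∨ ((∀ x ∈ food_times, 0 ≤ x) ∧ 0 ≤ k)
instance (food_times : List Int) (k : Int) : Decidable (Pre_solution food_times k) := by
  unfold Pre_solution; infer_instance

def pvWitness_solution : List Int × Int := ([3, 1, 2], 5)

def Spec_solution (food_times : List Int) (k : Int) (out : Int) : Prop := out = solution_alt food_times k
instance (food_times : List Int) (k : Int) (out : Int) : Decidable (Spec_solution food_times k out) := by
  unfold Spec_solution; infer_instance

-- ===== CLAIM (what is proved, stated in full; the proofs are below) =====
def Claim_equal_solution : Prop := ∀ (food_times : List Int) (k : Int), Dom_solution food_times k → Pre_solution food_times k → Spec_solution food_times k (solution food_times k)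

-- ===== LEMMAS AND PROOFS =====

def pvSurv (en : List (Int × Int)) (θ : Int) : List Int :=
  (en.filter (fun p => θ < p.2)).map Prod.fst

lemma pvScanA_hit (en : List (Int × Int)) (turn : Int) :
    ∀ k : Int, 0 ≤ k → k < (pvSurv en turn).length →
    pvScanA en turn k = (some (((pvSurv en turn)[k.toNat]?).getD 0 + 1), 0) := by
  induction en with
  | nil => intro k hk0 hk; simp [pvSurv] at hk; omega
  | cons p rest ih =>
    intro k hk0 hk
    obtain ⟨i, ft⟩ := p
    by_cases hft : turn < ft
    · have hs : pvSurv ((i, ft) :: rest) turn = i :: pvSurv rest turn := by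
        simp [pvSurv, List.filter_cons, hft]
      by_cases hkz : k ≤ 0
      · have : k = 0 := le_antisymm hkz hk0
        subst this
        simp [pvScanA, hft, hs]
      · have hk1 : (0:Int) ≤ k - 1 := by omega
        have hlen : k - 1 < (pvSurv rest turn).length := by
          rw [hs] at hk; simp at hk; omega
        have := ih (k - 1) hk1 hlen
        rw [hs]
        simp only [pvScanA, if_pos hft, if_neg hkz, this]
        have hkn : k.toNat = (k - 1).toNat + 1 := by omega
        rw [hkn]
        simp
    · have hs : pvSurv ((i, ft) :: rest) turn = pvSurv rest turn := by
        simp [pvSurv, List.filter_cons, hft]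
      rw [hs] at hk ⊢
      simpa [pvScanA, hft] using ih k hk0 hk

lemma pvScanA_miss (en : List (Int × Int)) (turn : Int) :
    ∀ k : Int, ((pvSurv en turn).length : Int) ≤ k →
    pvScanA en turn k = (none, k - (pvSurv en turn).length) := by
  induction en with
  | nil => intro k hk; simp [pvSurv, pvScanA]
  | cons p rest ih =>
    intro k hk
    obtain ⟨i, ft⟩ := p
    by_cases hft : turn < ft
    · have hs : pvSurv ((i, ft) :: rest) turn = i :: pvSurv rest turn := by
        simp [pvSurv, List.filter_cons, hft]
      rw [hs] at hk ⊢
      have hkz : ¬ k ≤ 0 := by simp at hk; omega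
      have := ih (k - 1) (by simp at hk ⊢; omega)
      simp only [pvScanA, if_pos hft, if_neg hkz, this]
      simp only [Prod.mk.injEq, List.length_cons]
      refine ⟨trivial, by push_cast; ring⟩
    · have hs : pvSurv ((i, ft) :: rest) turn = pvSurv rest turn := by
        simp [pvSurv, List.filter_cons, hft]
      rw [hs] at hk ⊢
      simpa [pvScanA, hft] using ih k hk

lemma pvWhileA_spec (en : List (Int × Int)) (counter : PySem.Dict Int Int) (ct : List Int)
    (t : Int) :
    ∀ (fuel : Nat) (k turn left : Int),
    (∀ p ∈ en, ¬(turn < p.2 ∧ p.2 < t)) →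
    (∀ u : Int, turn < u → u < t → u ∉ ct) →
    0 ≤ k → k < (t - turn) * left →
    left = ((pvSurv en turn).length : Int) →
    k.toNat + 2 ≤ fuel →
    pvWhileA en counter ct fuel k left turn
      = some (((pvSurv en turn)[(PySem.Int.mod k left).toNat]?).getD 0 + 1) := by
  intro fuel
  induction fuel with
  | zero => intro k turn left _ _ _ _ _ hf; omega
  | succ fuel ih =>
    intro k turn left Hen Hct hk0 hkb hleft hf
    have hl0 : (0:Int) ≤ left := by rw [hleft]; exact Int.natCast_nonneg _
    have hprod : 0 < (t - turn) * left := lt_of_le_of_lt hk0 hkb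
    have hlp : 0 < left := by
      rcases lt_or_eq_of_le hl0 with h | h
      · exact h
      · exfalso; rw [← h, mul_zero] at hprod; exact lt_irrefl _ hprod
    have htt : 0 < t - turn := by
      by_contra h
      push_neg at h
      exact absurd hprod (not_lt.mpr (mul_nonpos_iff.mpr (Or.inr ⟨h, hl0⟩)))
    have hmod : PySem.Int.mod k left = k % left := PySem.Int.mod_eq_emod_of_pos hlp
    by_cases hkl : k - left ≤ 0
    · by_cases hklt : k < left
      · -- direct hit
        have hscan := pvScanA_hit en turn k hk0 (by omega)
        simp only [pvWhileA, if_pos hkl, hscan]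
        have : k % left = k := Int.emod_eq_of_lt hk0 hklt
        rw [hmod, this]
      · -- k = left : scan misses once, then hits the first survivor at turn+1
        have hke : k = left := by omega
        have hscan := pvScanA_miss en turn k (by omega)
        have htt2 : 1 < t - turn := by
          have : (1:Int) * left < (t - turn) * left := by rw [one_mul]; omega
          exact lt_of_mul_lt_mul_right this hl0
        have hsurv : pvSurv en (turn + 1) = pvSurv en turn := by
          unfold pvSurv
          congr 1
          apply List.filter_congr
          intro p hp
          have := Hen p hp
          simp only [decide_eq_decide]
          constructor <;> intro h
          · omega
          · by_contra hc; push_neg at hc; omega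
        have hrec := ih 0 (turn + 1) left
          (by intro p hp; have := Hen p hp; omega)
          (by intro u h1 h2; exact Hct u (by omega) h2)
          le_rfl
          (mul_pos (by omega) hlp)
          (by rw [hsurv]; exact hleft)
          (by omega)
        simp only [pvWhileA, if_pos hkl, hscan]
        have hz : k - ((pvSurv en turn).length : Int) = 0 := by omega
        rw [hz, hrec, hsurv]
        have h1 : PySem.Int.mod 0 left = 0 % left := PySem.Int.mod_eq_emod_of_pos hlp
        have h2 : k % left = 0 := by rw [hke]; simp
        rw [hmod, h1, h2]
        norm_num
    · -- full round: k -= left, turn += 1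
      have hkgt : left < k := by omega
      have htt2 : 1 < t - turn := by
        have : (1:Int) * left < (t - turn) * left := by rw [one_mul]; omega
        exact lt_of_mul_lt_mul_right this hl0
      have hmem : turn + 1 ∉ ct := Hct (turn + 1) (by omega) (by omega)
      have hsurv : pvSurv en (turn + 1) = pvSurv en turn := by
        unfold pvSurv
        congr 1
        apply List.filter_congr
        intro p hp
        have := Hen p hp
        simp only [decide_eq_decide]
        constructor <;> intro h
        · omega
        · by_contra hc; push_neg at hc; omega
      have hrec := ih (k - left) (turn + 1) left
        (by intro p hp; have := Hen p hp; omega)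
        (by intro u h1 h2; exact Hct u (by omega) h2)
        (by omega)
        (by have : (t - (turn + 1)) * left = (t - turn) * left - left := by ring
            omega)
        (by rw [hsurv]; exact hleft)
        (by omega)
      simp only [pvWhileA, if_neg hkl, if_neg hmem]
      rw [hrec, hsurv]
      have h1 : PySem.Int.mod (k - left) left = (k - left) % left :=
        PySem.Int.mod_eq_emod_of_pos hlp
      rw [hmod, h1, Int.sub_emod_right]

def pvSP (fts : List Int) : List (Int × Int) :=
  PySem.List.sorted ((PySem.List.enumerate fts 0).map (fun p => (p.2, p.1))) Prod.fst

def pvCT (fts : List Int) : List Int :=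
  PySem.List.sorted (PySem.Dict.counter fts).keys (fun x => x)

lemma pvSP_pairwise (fts : List Int) : (pvSP fts).Pairwise (fun a b => a.1 ≤ b.1) :=
  PySem.List.sorted_pairwise _ _

lemma pvSP_perm (fts : List Int) :
    (pvSP fts).Perm ((PySem.List.enumerate fts 0).map (fun p => (p.2, p.1))) :=
  PySem.List.sorted_perm _ _ _

lemma pvSP_mem_fst (fts : List Int) (p : Int × Int) (h : p ∈ pvSP fts) : p.1 ∈ fts := by
  have := (PySem.List.mem_sorted _ _ _ _).mp h
  rcases List.mem_map.mp this with ⟨q, hq, rfl⟩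
  have hm : q.2 ∈ List.map (fun x => x.2) (PySem.List.enumerate fts 0) := List.mem_map_of_mem hq
  rwa [PySem.List.map_snd_enumerate fts 0] at hm

lemma pvSP_exists (fts : List Int) (v : Int) (h : v ∈ fts) : ∃ i, (v, i) ∈ pvSP fts := by
  rw [← PySem.List.map_snd_enumerate fts 0] at h
  rcases List.mem_map.mp h with ⟨q, hq, rfl⟩
  exact ⟨q.1, (PySem.List.mem_sorted _ _ _ _).mpr (List.mem_map_of_mem hq)⟩

lemma pvCT_pairwise (fts : List Int) : (pvCT fts).Pairwise (· < ·) := by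
  unfold pvCT
  rw [PySem.Dict.keys_counter]
  exact PySem.List.sorted_ofList_pairwise_lt fts

lemma pvCT_mem (fts : List Int) (v : Int) : v ∈ pvCT fts ↔ v ∈ fts := by
  unfold pvCT
  rw [PySem.List.mem_sorted, PySem.Dict.keys_counter, PySem.Set.mem_ofList]

lemma pvSurv_perm (fts : List Int) (turn : Int) :
    (((pvSP fts).filter (fun p => turn < p.1)).map Prod.snd).Perm
      (pvSurv (PySem.List.enumerate fts 0) turn) := by
  have h1 := ((pvSP_perm fts).filter (fun p => decide (turn < p.1))).map Prod.snd
  refine h1.trans ?_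
  rw [List.filter_map]
  rw [List.map_map]
  unfold pvSurv
  apply List.Perm.of_eq
  congr 1

lemma pvSurv_pairwise (fts : List Int) (turn : Int) :
    (pvSurv (PySem.List.enumerate fts 0) turn).Pairwise (· < ·) := by
  unfold pvSurv
  exact ((PySem.List.pairwise_lt_enumerate fts 0).filter _).map _ (fun a b h => h)

lemma pvSurv_eq_sorted (fts : List Int) (turn : Int) :
    PySem.List.sorted (((pvSP fts).filter (fun p => turn < p.1)).map Prod.snd) (fun x => x)
      = pvSurv (PySem.List.enumerate fts 0) turn :=
  PySem.List.sorted_eq_of_perm_of_pairwise_lt _ _ _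
    (pvSurv_perm fts turn).symm (pvSurv_pairwise fts turn)

lemma pvSurv_len (fts : List Int) (turn : Int) :
    (pvSurv (PySem.List.enumerate fts 0) turn).length
      = ((pvSP fts).filter (fun p => turn < p.1)).length := by
  have := (pvSurv_perm fts turn).length_eq
  simpa using this.symm

lemma pvCount (fts : List Int) (t : Int) :
    ((pvSP fts).filter (fun p => p.1 = t)).length = fts.count t := by
  have h1 := ((pvSP_perm fts).filter (fun p => decide (p.1 = t))).length_eq
  rw [h1, List.filter_map, List.length_map]
  conv_rhs => rw [← PySem.List.map_snd_enumerate fts 0]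
  rw [List.count_eq_countP, List.countP_map, List.countP_eq_length_filter]
  congr 1

lemma pvGoB_skip (t k : Int) (hk : 0 ≤ k) :
    ∀ (Q : List (Int × Int)), Q.Pairwise (fun a b => a.1 ≤ b.1) → (∀ p ∈ Q, t ≤ p.1) →
    pvGoB Q t k = pvGoB (Q.filter (fun p => t < p.1)) t k := by
  intro Q
  induction Q with
  | nil => intro _ _; rfl
  | cons q rest ih =>
    intro hpw hge
    obtain ⟨t0, i0⟩ := q
    by_cases hlt : t < t0
    · have : List.filter (fun p => decide (t < p.1)) ((t0, i0) :: rest) = (t0, i0) :: rest := by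
        apply List.filter_eq_self.mpr
        intro p hp
        rcases List.mem_cons.mp hp with rfl | hp
        · simpa using hlt
        · have h1 : t0 ≤ p.1 := (List.pairwise_cons.mp hpw).1 p hp
          simp; omega
      rw [this]
    · have he : t0 = t := le_antisymm (by omega) (hge (t0, i0) (List.mem_cons_self))
      subst he
      have hstep : pvGoB ((t0, i0) :: rest) t0 k = pvGoB rest t0 k := by
        simp only [pvGoB]
        rw [if_neg (by simp; omega)]
        norm_num
      rw [hstep]
      have : List.filter (fun p => decide (t0 < p.1)) ((t0, i0) :: rest)
          = List.filter (fun p => decide (t0 < p.1)) rest := by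
        simp
      rw [this]
      exact ih (List.pairwise_cons.mp hpw).2 (fun p hp => hge p (List.mem_cons_of_mem _ hp))

-- suffix structure of a strictly increasing list under an `a < ·` filter
lemma pvFilterTail (a t : Int) (r : List Int) :
    ∀ (ct : List Int), ct.Pairwise (· < ·) →
    ct.filter (fun v => a < v) = t :: r →
    r = ct.filter (fun v => t < v) ∧ a < t ∧ (∀ v ∈ ct, a < v → t ≤ v) := by
  intro ct
  induction ct with
  | nil => intro _ h; simp at h
  | cons c cs ih =>
    intro hpw h
    have hcs : ∀ v ∈ cs, c < v := (List.pairwise_cons.mp hpw).1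
    by_cases hac : a < c
    · rw [List.filter_cons_of_pos (by simpa using hac)] at h
      obtain ⟨rfl, hr⟩ : c = t ∧ List.filter (fun v => decide (a < v)) cs = r := by
        have := List.cons.injEq c (List.filter (fun v => decide (a < v)) cs) t r ▸ h
        exact ⟨(List.cons.inj h).1, (List.cons.inj h).2⟩
      have h1 : List.filter (fun v => decide (a < v)) cs = cs :=
        List.filter_eq_self.mpr (fun v hv => by have := hcs v hv; simp; omega)
      have h2 : List.filter (fun v => decide (c < v)) cs = cs :=
        List.filter_eq_self.mpr (fun v hv => by have := hcs v hv; simp; omega)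
      refine ⟨?_, hac, ?_⟩
      · rw [List.filter_cons_of_neg (by simp), h2, ← h1, hr]
      · intro v hv hav
        rcases List.mem_cons.mp hv with rfl | hv
        · exact le_refl _
        · exact le_of_lt (hcs v hv)
    · rw [List.filter_cons_of_neg (by simpa using hac)] at h
      obtain ⟨h1, h2, h3⟩ := ih (List.pairwise_cons.mp hpw).2 h
      refine ⟨?_, h2, ?_⟩
      · rw [h1, List.filter_cons_of_neg (by simp; omega)]
      · intro v hv hav
        rcases List.mem_cons.mp hv with rfl | hv
        · omega
        · exact h3 v hv hav

-- splitting the remaining pairs of level turn at the next distinct time t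
lemma pvSplit (fts : List Int) (turn t : Int) (htt : turn < t)
    (hge : ∀ p ∈ (pvSP fts).filter (fun p => turn < p.1), t ≤ p.1) :
    ((pvSP fts).filter (fun p => turn < p.1)).filter (fun p => t < p.1)
      = (pvSP fts).filter (fun p => t < p.1) := by
  rw [List.filter_filter]
  apply List.filter_congr
  intro p _
  by_cases h : t < p.1
  · simp [h]; omega
  · simp [h]

lemma pvMain (fts : List Int) :
    ∀ (cts : List Int) (turn k : Int),
    cts = (pvCT fts).filter (fun v => turn < v) →
    0 ≤ k →
    k < (((pvSP fts).filter (fun p => turn < p.1)).map (fun p => p.1 - turn)).sum →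
    pvOuterA (PySem.List.enumerate fts 0) (PySem.Dict.counter fts) (pvCT fts) cts k
        ((((pvSP fts).filter (fun p => turn < p.1)).length : Int)) turn
      = pvGoB ((pvSP fts).filter (fun p => turn < p.1)) turn k := by
  intro cts
  induction cts with
  | nil =>
    intro turn k hcts hk0 hkrem
    have hP : (pvSP fts).filter (fun p => turn < p.1) = [] := by
      rw [List.filter_eq_nil_iff]
      intro p hp hlt
      have h1 : p.1 ∈ fts := pvSP_mem_fst fts p hp
      have h2 : p.1 ∈ pvCT fts := (pvCT_mem fts p.1).mpr h1
      have h3 : p.1 ∈ (pvCT fts).filter (fun v => turn < v) :=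
        List.mem_filter.mpr ⟨h2, hlt⟩
      rw [← hcts] at h3
      simp at h3
    rw [hP] at hkrem
    simp at hkrem
    omega
  | cons t cts' ih =>
    intro turn k hcts hk0 hkrem
    obtain ⟨hr, hat, hmin⟩ := pvFilterTail turn t cts' (pvCT fts) (pvCT_pairwise fts) hcts.symm
    have hminv : ∀ v ∈ fts, turn < v → t ≤ v :=
      fun v hv => hmin v ((pvCT_mem fts v).mpr hv)
    have htmem : t ∈ fts := by
      have h1 : t ∈ (pvCT fts).filter (fun v => turn < v) := by
        rw [← hcts]; exact List.mem_cons_self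
      exact (pvCT_mem fts t).mp (List.mem_filter.mp h1).1
    have hPmemge : ∀ p ∈ (pvSP fts).filter (fun p => turn < p.1), t ≤ p.1 := by
      intro p hp
      exact hminv p.1 (pvSP_mem_fst _ _ (List.mem_filter.mp hp).1)
        (by simpa using (List.mem_filter.mp hp).2)
    obtain ⟨i0, hi0⟩ := pvSP_exists fts t htmem
    have hi0P : (t, i0) ∈ (pvSP fts).filter (fun p => turn < p.1) :=
      List.mem_filter.mpr ⟨hi0, by simpa using hat⟩
    have hPpw : ((pvSP fts).filter (fun p => turn < p.1)).Pairwise (fun a b => a.1 ≤ b.1) :=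
      (pvSP_pairwise fts).filter _
    obtain ⟨q, P', hPeq⟩ : ∃ q P', (pvSP fts).filter (fun p => turn < p.1) = q :: P' := by
      cases hPc : (pvSP fts).filter (fun p => turn < p.1) with
      | nil => rw [hPc] at hi0P; simp at hi0P
      | cons a b => exact ⟨a, b, rfl⟩
    obtain ⟨t0, i1⟩ := q
    have hheadt : t0 = t := by
      have hge : t ≤ t0 := hPmemge (t0, i1) (by rw [hPeq]; exact List.mem_cons_self)
      have hle : t0 ≤ t := by
        rcases List.mem_cons.mp (hPeq ▸ hi0P) with heq | hmem
        · exact le_of_eq (congrArg Prod.fst heq).symm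
        · have hpw2 : List.Pairwise (fun a b : Int × Int => a.1 ≤ b.1) ((t0, i1) :: P') :=
            hPeq ▸ hPpw
          exact (List.pairwise_cons.mp hpw2).1 (t, i0) hmem
      omega
    rw [hheadt] at hPeq
    have hlen1 : ((pvSP fts).filter (fun p => turn < p.1)).length = P'.length + 1 := by
      rw [hPeq]; rfl
    have hlpos : ¬ ((((pvSP fts).filter (fun p => turn < p.1)).length : Int) ≤ 0) := by
      rw [hlen1]; push_cast; omega
    -- sum decomposition
    have hsum : (((pvSP fts).filter (fun p => turn < p.1)).map (fun p => p.1 - turn)).sum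
        = (((pvSP fts).filter (fun p => t < p.1)).map (fun p => p.1 - t)).sum
          + (((pvSP fts).filter (fun p => turn < p.1)).length : Int) * (t - turn) := by
      have e1 : (((pvSP fts).filter (fun p => turn < p.1)).map (fun p => p.1 - turn)).sum
          = (((pvSP fts).filter (fun p => turn < p.1)).map (fun p => p.1 - t)).sum
            + (((pvSP fts).filter (fun p => turn < p.1)).length : Int) * (t - turn) := by
        rw [← PySem.List.sum_map_const_int ((pvSP fts).filter (fun p => turn < p.1)) (t - turn)]
        rw [← PySem.List.sum_map_add_int]
        congr 1
        apply List.map_congr_left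
        intro p _
        ring
      rw [e1]
      congr 1
      -- split the first sum by (t < ·.1); the ¬ part is all zeros
      have hperm := (List.filter_append_perm (fun p => decide (t < p.1))
        ((pvSP fts).filter (fun p => turn < p.1))).map (fun p => p.1 - t)
      have := hperm.sum_eq
      rw [List.map_append, List.sum_append] at this
      rw [← this, pvSplit fts turn t hat hPmemge]
      have hzero : ((((pvSP fts).filter (fun p => turn < p.1)).filter
          (fun p => !decide (t < p.1))).map (fun p => p.1 - t)).sum = 0 := by
        apply List.sum_eq_zero
        intro x hx
        rcases List.mem_map.mp hx with ⟨p, hp, rfl⟩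
        have h1 := hPmemge p (List.mem_of_mem_filter hp)
        have h2 := (List.mem_filter.mp hp).2
        simp at h2
        omega
      omega
    -- common abbreviations
    have hrem : ((P'.length : Int) + 1)
        = (((pvSP fts).filter (fun p => turn < p.1)).length : Int) := by
      rw [hlen1]; push_cast; ring
    have hP'mem : ∀ p ∈ P', t ≤ p.1 := by
      intro p hp
      exact hPmemge p (by rw [hPeq]; exact List.mem_cons_of_mem _ hp)
    have hP'pw : P'.Pairwise (fun a b : Int × Int => a.1 ≤ b.1) := by
      have : List.Pairwise (fun a b : Int × Int => a.1 ≤ b.1) ((t, i1) :: P') := hPeq ▸ hPpw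
      exact (List.pairwise_cons.mp this).2
    have hPfilter : P'.filter (fun p => t < p.1) = (pvSP fts).filter (fun p => t < p.1) := by
      rw [← pvSplit fts turn t hat hPmemge, hPeq]
      rw [List.filter_cons_of_neg (by simp)]
    by_cases hbr : k - (t - turn) * (((pvSP fts).filter (fun p => turn < p.1)).length : Int) < 0
    · -- overshoot: A runs the while loop, B indexes the sorted survivors
      have hwhile := pvWhileA_spec (PySem.List.enumerate fts 0) (PySem.Dict.counter fts)
        (pvCT fts) t (k.toNat + 2) k turn
        (((pvSP fts).filter (fun p => turn < p.1)).length : Int)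
        (by intro p hp
            have h2 : p.2 ∈ fts := by
              have := List.mem_map_of_mem (f := fun x : Int × Int => x.2) hp
              rwa [PySem.List.map_snd_enumerate fts 0] at this
            rintro ⟨h3, h4⟩
            exact absurd (hminv p.2 h2 h3) (by omega))
        (by intro u h1 h2 hu
            exact absurd (hminv u ((pvCT_mem fts u).mp hu) h1) (by omega))
        hk0 (by omega)
        (by rw [pvSurv_len])
        le_rfl
      have hA : pvOuterA (PySem.List.enumerate fts 0) (PySem.Dict.counter fts) (pvCT fts)
          (t :: cts') k (((pvSP fts).filter (fun p => turn < p.1)).length : Int) turn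
          = ((pvSurv (PySem.List.enumerate fts 0) turn)[(PySem.Int.mod k
              (((pvSP fts).filter (fun p => turn < p.1)).length : Int)).toNat]?).getD 0 + 1 := by
        simp only [pvOuterA, if_neg hlpos, if_pos hbr, hwhile, Option.getD_some]
      rw [hA, hPeq]
      simp only [pvGoB]
      rw [if_pos (by rw [hrem]; omega)]
      have hsort : PySem.List.sorted (((t, i1) :: P').map Prod.snd) (fun x => x)
          = pvSurv (PySem.List.enumerate fts 0) turn := by
        rw [← hPeq]; exact pvSurv_eq_sorted fts turn
      rw [hsort, hrem]
      have hmodpos : 0 ≤ PySem.Int.mod k (((pvSP fts).filter (fun p => turn < p.1)).length : Int) :=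
        PySem.Int.mod_nonneg k (by omega)
      rw [PySem.List.pyGetD_of_nonneg _ _ hmodpos, List.getD_eq_getElem?_getD]
      simp only [List.length_cons]
      push_cast
      rw [hrem]
    · -- full level: both subtract the whole block and move to the next distinct time
      have hcount : (PySem.Dict.counter fts).getD t 0 = (fts.count t : Int) :=
        PySem.Dict.getD_counter fts t
      have harith : (((pvSP fts).filter (fun p => turn < p.1)).length : Int) - (fts.count t : Int)
          = (((pvSP fts).filter (fun p => t < p.1)).length : Int) := by
        have hperm := (List.filter_append_perm (fun p => decide (t < p.1))
          ((pvSP fts).filter (fun p => turn < p.1))).length_eq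
        rw [List.length_append] at hperm
        have h1 : ((pvSP fts).filter (fun p => turn < p.1)).filter (fun p => !decide (t < p.1))
            = (pvSP fts).filter (fun p => p.1 = t) := by
          have e1 : ((pvSP fts).filter (fun p => turn < p.1)).filter (fun p => !decide (t < p.1))
              = ((pvSP fts).filter (fun p => turn < p.1)).filter (fun p => decide (p.1 = t)) := by
            apply List.filter_congr
            intro p hp
            have := hPmemge p hp
            by_cases h : p.1 = t
            · simp [h]
            · simp [h]; omega
          rw [e1, List.filter_filter]
          apply List.filter_congr
          intro p _
          by_cases h : p.1 = t
          · simp [h]; omega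
          · simp [h]
        rw [pvSplit fts turn t hat hPmemge, h1, pvCount] at hperm
        push_cast
        omega
      have hsump : (((pvSP fts).filter (fun p => turn < p.1)).length : Int) * (t - turn)
          = (t - turn) * (((pvSP fts).filter (fun p => turn < p.1)).length : Int) := mul_comm _ _
      have hA : pvOuterA (PySem.List.enumerate fts 0) (PySem.Dict.counter fts) (pvCT fts)
          (t :: cts') k (((pvSP fts).filter (fun p => turn < p.1)).length : Int) turn
          = pvOuterA (PySem.List.enumerate fts 0) (PySem.Dict.counter fts) (pvCT fts)
            cts' (k - (t - turn) * (((pvSP fts).filter (fun p => turn < p.1)).length : Int))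
            ((((pvSP fts).filter (fun p => t < p.1)).length : Int)) t := by
        simp only [pvOuterA, if_neg hlpos, if_neg hbr, hcount, harith]
      have hB : pvGoB ((pvSP fts).filter (fun p => turn < p.1)) turn k
          = pvGoB ((pvSP fts).filter (fun p => t < p.1)) t
            (k - (t - turn) * (((pvSP fts).filter (fun p => turn < p.1)).length : Int)) := by
        rw [hPeq]
        simp only [pvGoB]
        rw [if_neg (by rw [hrem]; omega), hrem]
        rw [pvGoB_skip t _ (by omega) P' hP'pw hP'mem, hPfilter]
        simp only [List.length_cons]
        push_cast
        rw [hrem]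
      rw [hA, hB]
      exact ih t (k - (t - turn) * (((pvSP fts).filter (fun p => turn < p.1)).length : Int))
        hr (by omega) (by omega)


lemma pvSum_sp (fts : List Int) : ((pvSP fts).map (fun p => p.1)).sum = fts.sum := by
  have h1 := ((pvSP_perm fts).map (fun p : Int × Int => p.1)).sum_eq
  rw [h1, List.map_map]
  have : ((fun p : Int × Int => p.1) ∘ fun p : Int × Int => (p.2, p.1)) = fun p : Int × Int => p.2 := rfl
  rw [this, PySem.List.map_snd_enumerate]

lemma pvLen_sp (fts : List Int) : (pvSP fts).length = fts.length := by
  have h1 := (pvSP_perm fts).length_eq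
  rw [h1, List.length_map]
  have h2 := congrArg List.length (PySem.List.map_snd_enumerate fts 0)
  rwa [List.length_map] at h2

lemma pvSP_fst_nonneg (fts : List Int) (hpos : ∀ x ∈ fts, 0 ≤ x) :
    ∀ p ∈ pvSP fts, 0 ≤ p.1 := fun p hp => hpos p.1 (pvSP_mem_fst fts p hp)

-- sum over the positive-time pairs = total sum, when all times are ≥ θ-style zero
lemma pvSum_pos (fts : List Int) (hpos : ∀ x ∈ fts, 0 ≤ x) :
    (((pvSP fts).filter (fun p => 0 < p.1)).map (fun p => p.1 - 0)).sum = fts.sum := by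
  have hperm := (List.filter_append_perm (fun p : Int × Int => decide (0 < p.1)) (pvSP fts)).map
    (fun p : Int × Int => p.1)
  have hs := hperm.sum_eq
  rw [List.map_append, List.sum_append] at hs
  have hzero : (((pvSP fts).filter (fun p => !decide (0 < p.1))).map (fun p : Int × Int => p.1)).sum = 0 := by
    apply List.sum_eq_zero
    intro x hx
    rcases List.mem_map.mp hx with ⟨p, hp, rfl⟩
    have h1 := pvSP_fst_nonneg fts hpos p (List.mem_of_mem_filter hp)
    have h2 := (List.mem_filter.mp hp).2
    simp at h2
    omega
  have he : (((pvSP fts).filter (fun p => 0 < p.1)).map (fun p => p.1 - 0)).sum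
      = (((pvSP fts).filter (fun p => 0 < p.1)).map (fun p : Int × Int => p.1)).sum := by
    congr 1
    apply List.map_congr_left
    intro p _
    ring
  rw [he]
  rw [hzero, add_zero] at hs
  rw [hs, pvSum_sp]

lemma pvTop (fts : List Int) (k : Int) (hpos : ∀ x ∈ fts, 0 ≤ x) (hk0 : 0 ≤ k)
    (hs : ¬ fts.sum ≤ k) :
    pvOuterA (PySem.List.enumerate fts 0) (PySem.Dict.counter fts) (pvCT fts) (pvCT fts)
        k (fts.length : Int) 0
      = pvGoB (pvSP fts) 0 k := by
  have hskip : pvGoB (pvSP fts) 0 k = pvGoB ((pvSP fts).filter (fun p => 0 < p.1)) 0 k :=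
    pvGoB_skip 0 k hk0 (pvSP fts) (pvSP_pairwise fts) (pvSP_fst_nonneg fts hpos)
  by_cases h0 : (0 : Int) ∈ fts
  · -- 0 is the minimal distinct time: one initial zero-block step on the A side
    obtain ⟨c, r, hct⟩ : ∃ c r, pvCT fts = c :: r := by
      cases hc : pvCT fts with
      | nil => rw [← pvCT_mem fts 0, hc] at h0; simp at h0
      | cons a b => exact ⟨a, b, rfl⟩
    have hc0 : c = 0 := by
      have hcmem : c ∈ fts := (pvCT_mem fts c).mp (by rw [hct]; exact List.mem_cons_self)
      have h0ct : (0 : Int) ∈ pvCT fts := (pvCT_mem fts 0).mpr h0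
      rw [hct] at h0ct
      rcases List.mem_cons.mp h0ct with heq | hmem
      · omega
      · have := (List.pairwise_cons.mp (hct ▸ pvCT_pairwise fts)).1 0 hmem
        have := hpos c hcmem
        omega
    subst hc0
    have hrfilter : r = (pvCT fts).filter (fun v => 0 < v) := by
      have hcs := (List.pairwise_cons.mp (hct ▸ pvCT_pairwise fts)).1
      rw [hct, List.filter_cons_of_neg (by simp)]
      exact (List.filter_eq_self.mpr (fun v hv => by have := hcs v hv; simp; omega)).symm
    have hne : fts ≠ [] := fun h => by rw [h] at h0; simp at h0
    have hnpos : ¬ ((fts.length : Int) ≤ 0) := by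
      have := List.length_pos_iff.mpr hne
      push_cast
      omega
    have hcount : (PySem.Dict.counter fts).getD 0 0 = (fts.count 0 : Int) :=
      PySem.Dict.getD_counter fts 0
    have hmem0 : ∀ p ∈ pvSP fts, 0 ≤ p.1 := pvSP_fst_nonneg fts hpos
    have harith : (fts.length : Int) - (fts.count 0 : Int)
        = (((pvSP fts).filter (fun p => 0 < p.1)).length : Int) := by
      have hperm := (List.filter_append_perm (fun p : Int × Int => decide (0 < p.1)) (pvSP fts)).length_eq
      rw [List.length_append] at hperm
      have h1 : (pvSP fts).filter (fun p => !decide (0 < p.1)) = (pvSP fts).filter (fun p => p.1 = 0) := by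
        apply List.filter_congr
        intro p hp
        have := hmem0 p hp
        by_cases h : p.1 = 0
        · simp [h]
        · simp [h]; omega
      rw [h1, pvCount, pvLen_sp] at hperm
      push_cast
      omega
    have hA1 : pvOuterA (PySem.List.enumerate fts 0) (PySem.Dict.counter fts) (pvCT fts)
        (pvCT fts) k (fts.length : Int) 0
        = pvOuterA (PySem.List.enumerate fts 0) (PySem.Dict.counter fts) (pvCT fts)
          r k ((((pvSP fts).filter (fun p => 0 < p.1)).length : Int)) 0 := by
      rw [hct]
      simp only [pvOuterA, if_neg hnpos, hcount]
      rw [if_neg (by simp; omega)]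
      rw [show k - (0 - 0) * (fts.length : Int) = k by ring, harith]
    rw [hA1, hskip]
    exact pvMain fts r 0 k hrfilter hk0 (by rw [pvSum_pos fts hpos]; omega)
  · -- all times are positive: the filters are the identity
    have hallpos : ∀ x ∈ fts, 0 < x := by
      intro x hx
      have := hpos x hx
      rcases eq_or_lt_of_le this with h | h
      · exact absurd (h ▸ hx) h0
      · exact h
    have hctf : (pvCT fts).filter (fun v => 0 < v) = pvCT fts :=
      List.filter_eq_self.mpr (fun v hv => by
        have := hallpos v ((pvCT_mem fts v).mp hv); simpa using this)
    have hspf : (pvSP fts).filter (fun p => 0 < p.1) = pvSP fts :=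
      List.filter_eq_self.mpr (fun p hp => by
        have := hallpos p.1 (pvSP_mem_fst fts p hp); simpa using this)
    have hlen : (fts.length : Int) = (((pvSP fts).filter (fun p => 0 < p.1)).length : Int) := by
      rw [hspf, pvLen_sp]
    rw [hskip, hlen]
    have := pvMain fts (pvCT fts) 0 k hctf.symm hk0 (by rw [pvSum_pos fts hpos]; omega)
    rw [hspf] at this ⊢
    exact this

lemma pvEquiv : ∀ (food_times : List Int) (k : Int),
    (food_times.sum ≤ k ∨ ((∀ x ∈ food_times, 0 ≤ x) ∧ 0 ≤ k)) →
    solution food_times k = solution_alt food_times k := by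
  intro fts k hpre
  by_cases hs : fts.sum ≤ k
  · simp only [solution, solution_alt, if_pos hs]
  · rcases hpre with h | ⟨hpos, hk0⟩
    · exact absurd h hs
    · simp only [solution, solution_alt, if_neg hs]
      exact pvTop fts k hpos hk0 hs

-- ===== VERDICT (by name: the statement is the Claim_ definition above) =====
theorem solution_spec : Claim_equal_solution := by
  intro food_times k _ hpre
  show solution food_times k = solution_alt food_times k
  exact pvEquiv food_times k hpre
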